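-- pv_equiv track=rewrite | github.com/davichocv18/HPC | Lab02/Python_version.py | multiply_row
-- ===== SOURCE A (Python) =====
-- def multiply_row(args):
--     """Multiply a single row of A with matrix B."""
--     row, B = args
--     n = len(B)
--     result_row = [0] * n
--     for k in range(n):
--         a_ik = row[k]
--         row_b = B[k]
--         for j in range(n):
--             result_row[j] += a_ik * row_b[j]
--     return result_row
-- ===== SOURCE B (Python) =====
-- def multiply_row(args):
--     """Multiply a single row of A with matrix B."""
--     row, B = args
--     n = len(B)
--     return [sum(row[k] * B[k][j] for k in range(n)) for j in range(n)]
-- ===== Notes on version B (the rewrite author's own statement) =====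
-- stated objective: simpler
-- what changed: B computes each output entry independently as a dot product over column j (a one-line comprehension reading B column-by-column), instead of A's accumulator array that scales each row of B and adds it pointwise into the whole result.
import Mathlib
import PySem

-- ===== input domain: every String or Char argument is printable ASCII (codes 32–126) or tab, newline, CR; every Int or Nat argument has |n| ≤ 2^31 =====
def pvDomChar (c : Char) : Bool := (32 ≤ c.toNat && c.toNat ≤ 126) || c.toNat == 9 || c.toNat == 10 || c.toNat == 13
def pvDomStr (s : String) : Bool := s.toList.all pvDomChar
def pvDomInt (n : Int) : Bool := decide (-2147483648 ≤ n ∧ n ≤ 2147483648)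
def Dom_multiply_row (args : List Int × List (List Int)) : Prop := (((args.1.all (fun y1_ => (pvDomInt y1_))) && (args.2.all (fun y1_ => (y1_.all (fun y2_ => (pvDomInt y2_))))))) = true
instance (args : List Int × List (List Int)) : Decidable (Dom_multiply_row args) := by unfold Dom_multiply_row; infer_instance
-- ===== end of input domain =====

-- B computes each output entry independently as a column-wise dot product instead of A's
-- row-scaling accumulator array; same O(n^2) cost, a simpler decomposition.


-- ===== PORT A =====
def multiply_row (args : List Int × List (List Int)) : List Int :=
  let row := args.1
  let B := args.2
  let n : Int := PySem.List.len B
  let result_row : List Int := List.replicate n.toNat 0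
  (PySem.List.pyRange 0 n 1).foldl (fun result_row k =>
    let a_ik := PySem.List.pyGetD row k 0
    let row_b := PySem.List.pyGetD B k []
    (PySem.List.pyRange 0 n 1).foldl (fun res j =>
      PySem.List.pySetD res j (PySem.List.pyGetD res j 0 + a_ik * PySem.List.pyGetD row_b j 0))
      result_row) result_row

-- ===== PORT B =====
def multiply_row_alt (args : List Int × List (List Int)) : List Int :=
  let row := args.1
  let B := args.2
  let n : Int := PySem.List.len B
  (PySem.List.pyRange 0 n 1).map (fun j =>
    (PySem.List.pyRange 0 n 1).foldl (fun acc k =>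
      acc + PySem.List.pyGetD row k 0 * PySem.List.pyGetD (PySem.List.pyGetD B k []) j 0) 0)

-- ===== PRECONDITION & SPEC =====
-- Pre_ excludes exactly the inputs where Python raises IndexError: the row shorter than
-- len(B), or some row of B shorter than len(B) (both A and B raise there).
def Pre_multiply_row (args : List Int × List (List Int)) : Prop :=
  args.2.length ≤ args.1.length ∧ ∀ r ∈ args.2, args.2.length ≤ r.length
instance (args : List Int × List (List Int)) : Decidable (Pre_multiply_row args) := by unfold Pre_multiply_row; infer_instance
def pvWitness_multiply_row : (List Int × List (List Int)) := ([1, 2], [[3, 4], [5, 6]])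

def Spec_multiply_row (args : List Int × List (List Int)) (out : List Int) : Prop := out = multiply_row_alt args
instance (args : List Int × List (List Int)) (out : List Int) : Decidable (Spec_multiply_row args out) := by unfold Spec_multiply_row; infer_instance

-- ===== CLAIM (what is proved, stated in full; the proofs are below) =====
def Claim_equal_multiply_row : Prop := ∀ (args : List Int × List (List Int)), Dom_multiply_row args → Pre_multiply_row args → Spec_multiply_row args (multiply_row args)

-- ===== LEMMAS AND PROOFS =====

-- the pointwise-update inner loop, with an already-finished prefix
theorem pv_inner (g : Nat → Int) : ∀ (l pre : List Int),
    (List.range' pre.length l.length).foldl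
      (fun r j => r.set j (r.getD j 0 + g j)) (pre ++ l)
    = pre ++ (l.zipIdx pre.length).map (fun p => p.1 + g p.2) := by
  intro l
  induction l with
  | nil => intro pre; simp
  | cons x l ih =>
    intro pre
    have hset : (pre ++ x :: l).set pre.length ((pre ++ x :: l).getD pre.length 0 + g pre.length)
        = pre ++ (x + g pre.length) :: l := by
      have hget : (pre ++ x :: l).getD pre.length 0 = x := by
        simp [List.getD]
      rw [hget, List.set_append_right _ _ (le_refl _)]
      simp
    have hlen : (pre ++ [x + g pre.length]).length = pre.length + 1 := by simp
    calc (List.range' pre.length (x :: l).length).foldl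
          (fun r j => r.set j (r.getD j 0 + g j)) (pre ++ x :: l)
        = (List.range' (pre.length + 1) l.length).foldl
            (fun r j => r.set j (r.getD j 0 + g j)) ((pre ++ [x + g pre.length]) ++ l) := by
          rw [List.length_cons, List.range'_succ, List.foldl_cons, hset, List.append_cons]
      _ = (pre ++ [x + g pre.length]) ++ (l.zipIdx (pre.length + 1)).map (fun p => p.1 + g p.2) := by
          rw [← hlen, ih, hlen]
      _ = pre ++ ((x :: l).zipIdx pre.length).map (fun p => p.1 + g p.2) := by
          simp [List.zipIdx_cons]

theorem pv_inner_zero (g : Nat → Int) (l : List Int) :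
    (List.range l.length).foldl (fun r j => r.set j (r.getD j 0 + g j)) l
    = (l.zipIdx 0).map (fun p => p.1 + g p.2) := by
  have := pv_inner g l []
  simpa [List.range_eq_range'] using this

theorem pv_zipIdx_map_range {α β : Type} (n : Nat) (f : Nat → α) (h : α → Nat → β) :
    (((List.range n).map f).zipIdx 0).map (fun p => h p.1 p.2)
    = (List.range n).map (fun j => h (f j) j) := by
  apply List.ext_getElem
  · simp
  · intro i h1 h2
    simp

theorem pv_step (n : Nat) (g : Nat → Int) (f : Nat → Int) :
    (List.range n).foldl (fun r j => r.set j (r.getD j 0 + g j)) ((List.range n).map f)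
    = (List.range n).map (fun j => f j + g j) := by
  have h := pv_inner_zero g ((List.range n).map f)
  rw [List.length_map, List.length_range] at h
  rw [h, pv_zipIdx_map_range n f (fun x j => x + g j)]

theorem pv_outer (n : Nat) (t : Nat → Nat → Int) : ∀ (m : Nat),
    (List.range m).foldl
      (fun res k => (List.range n).foldl (fun r j => r.set j (r.getD j 0 + t k j)) res)
      (List.replicate n 0)
    = (List.range n).map (fun j => (List.range m).foldl (fun acc k => acc + t k j) 0) := by
  intro m
  induction m with
  | zero => simp [List.map_const']
  | succ m ih =>
    rw [List.range_succ]
    simp only [List.foldl_append, List.foldl_cons, List.foldl_nil]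
    rw [ih]
    exact pv_step n (t m) _

-- ===== VERDICT (by name: the statement is the Claim_ definition above) =====
theorem multiply_row_spec : Claim_equal_multiply_row := by
  intro args _ _
  obtain ⟨row, B⟩ := args
  show multiply_row (row, B) = multiply_row_alt (row, B)
  unfold multiply_row multiply_row_alt
  simp only [PySem.List.len, PySem.List.pyRange_zero_natCast, List.foldl_map, List.map_map,
    Function.comp_def, PySem.List.pyGetD_natCast, PySem.List.pySetD_natCast, Int.toNat_natCast]
  exact pv_outer B.length (fun k j => row.getD k 0 * (B.getD k []).getD j 0) B.length
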